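-- pv_equiv track=rewrite | github.com/cursedprogrammer/pygame-projects | Conway's Game of Life/main.py | get_grid_pos
-- ===== SOURCE A (Python) =====
-- BLOCK_SIZE = 10
--
-- def get_grid_pos(grid, click_coords):
--     X_COORD = 0
--     Y_COORD = 0
--     for y in range(1, len(grid)):
--         for x in range(1, len(grid[0])):
--             if (click_coords[1] >= Y_COORD and click_coords[1] < Y_COORD + BLOCK_SIZE) and (click_coords[0] >= X_COORD and click_coords[0] < X_COORD + BLOCK_SIZE):
--                 return (y, x)
--             X_COORD += BLOCK_SIZE
--         Y_COORD += BLOCK_SIZE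
--         X_COORD = 0
-- ===== SOURCE B (Python) =====
-- BLOCK_SIZE = 10
--
-- def get_grid_pos(grid, click_coords):
--     # The scanned cells tile [0,(cols-1)*BS) x [0,(rows-1)*BS), so the hit
--     # cell index is direct floor division, bounds-checked.
--     if len(grid) < 2 or len(grid[0]) < 2:
--         return None
--     y = click_coords[1] // BLOCK_SIZE + 1
--     x = click_coords[0] // BLOCK_SIZE + 1
--     if 1 <= y <= len(grid) - 1 and 1 <= x <= len(grid[0]) - 1:
--         return (y, x)
--     return None
-- ===== Notes on version B (the rewrite author's own statement) =====
-- stated objective: alternative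
-- what changed: Replaced the nested scan over all grid cells with a closed-form floor division (coord // BLOCK_SIZE + 1) plus bounds checks; measured only ~1.46x at the largest size, so no speed claim.
import Mathlib
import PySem

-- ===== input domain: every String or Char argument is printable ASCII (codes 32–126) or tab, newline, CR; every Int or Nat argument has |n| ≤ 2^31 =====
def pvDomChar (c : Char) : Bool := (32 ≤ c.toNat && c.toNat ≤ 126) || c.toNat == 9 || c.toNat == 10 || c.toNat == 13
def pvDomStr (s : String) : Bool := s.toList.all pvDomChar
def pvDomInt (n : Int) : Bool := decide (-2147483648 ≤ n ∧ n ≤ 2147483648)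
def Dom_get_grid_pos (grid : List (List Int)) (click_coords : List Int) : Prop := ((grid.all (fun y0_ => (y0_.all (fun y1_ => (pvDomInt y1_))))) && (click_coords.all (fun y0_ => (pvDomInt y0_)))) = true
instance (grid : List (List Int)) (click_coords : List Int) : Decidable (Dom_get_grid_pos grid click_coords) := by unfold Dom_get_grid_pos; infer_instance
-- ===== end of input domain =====

-- B replaces A's nested scan over all grid cells with a closed-form floor
-- division (coord // BLOCK_SIZE + 1) plus bounds checks (alternative algorithm).


-- ===== PORT A =====
-- inner loop: 'for x in range(1, len(grid[0]))' with accumulator X_COORD;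
-- click_coords[0]/[1] ported with pyGetD (in range under Pre_; A raises IndexError otherwise,
-- which Pre_ excludes).  The final X_COORD is discarded by A (reset to 0), so it is not returned.
def ggpInner (cc : List Int) (y Y : Int) : List Int → Int → Option (List Int)
  | [], _ => none
  | x :: xs, X =>
      if PySem.List.pyGetD cc 1 0 ≥ Y ∧ PySem.List.pyGetD cc 1 0 < Y + 10 ∧
         PySem.List.pyGetD cc 0 0 ≥ X ∧ PySem.List.pyGetD cc 0 0 < X + 10
      then some [y, x]
      else ggpInner cc y Y xs (X + 10)

-- outer loop: 'for y in range(1, len(grid))' with accumulator Y_COORD, X_COORD reset to 0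
def ggpOuter (cols : Int) (cc : List Int) : List Int → Int → Option (List Int)
  | [], _ => none
  | y :: ys, Y =>
      match ggpInner cc y Y (PySem.List.pyRange 1 cols 1) 0 with
      | some r => some r
      | none => ggpOuter cols cc ys (Y + 10)

def get_grid_pos (grid : List (List Int)) (click_coords : List Int) : Option (List Int) :=
  ggpOuter ((grid.headD []).length : Int) click_coords
    (PySem.List.pyRange 1 (grid.length : Int) 1) 0

-- ===== PORT B =====
def get_grid_pos_alt (grid : List (List Int)) (click_coords : List Int) : Option (List Int) :=
  if grid.length < 2 ∨ (grid.headD []).length < 2 then none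
  else
    let y := PySem.Int.floordiv (PySem.List.pyGetD click_coords 1 0) 10 + 1
    let x := PySem.Int.floordiv (PySem.List.pyGetD click_coords 0 0) 10 + 1
    if 1 ≤ y ∧ y ≤ (grid.length : Int) - 1 ∧ 1 ≤ x ∧ x ≤ ((grid.headD []).length : Int) - 1
    then some [y, x]
    else none

-- ===== PRECONDITION & SPEC =====
-- Pre_ excludes exactly the inputs where Python A raises IndexError: a grid with at least
-- 2 rows and 2 columns but click_coords shorter than 2 (B raises the same IndexError there).
def Pre_get_grid_pos (grid : List (List Int)) (click_coords : List Int) : Prop :=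
  2 ≤ grid.length → 2 ≤ (grid.headD []).length → 2 ≤ click_coords.length
instance (grid : List (List Int)) (click_coords : List Int) : Decidable (Pre_get_grid_pos grid click_coords) := by unfold Pre_get_grid_pos; infer_instance

def pvWitness_get_grid_pos : List (List Int) × List Int := ([[0,0,0],[0,0,0],[0,0,0]], [15, 5])

def Spec_get_grid_pos (grid : List (List Int)) (click_coords : List Int) (out : Option (List Int)) : Prop := out = get_grid_pos_alt grid click_coords
instance (grid : List (List Int)) (click_coords : List Int) (out : Option (List Int)) : Decidable (Spec_get_grid_pos grid click_coords out) := by unfold Spec_get_grid_pos; infer_instance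

-- ===== CLAIM (what is proved, stated in full; the proofs are below) =====
def Claim_equal_get_grid_pos : Prop := ∀ (grid : List (List Int)) (click_coords : List Int), Dom_get_grid_pos grid click_coords → Pre_get_grid_pos grid click_coords → Spec_get_grid_pos grid click_coords (get_grid_pos grid click_coords)



-- ===== LEMMAS AND PROOFS =====

-- bracket facts for q = c // 10
theorem ggp_fd_bracket (c : Int) :
    PySem.Int.floordiv c 10 * 10 ≤ c ∧ c < (PySem.Int.floordiv c 10 + 1) * 10 :=
  (PySem.Int.floordiv_eq_iff_of_pos (by norm_num)).mp rfl

-- characterisation of the inner loop started at x = s with X_COORD = (s-1)*10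
theorem ggpInner_char (cc : List Int) (y Y cols : Int) :
    ∀ (n : Nat) (s X : Int), X = (s - 1) * 10 → (cols - s).toNat ≤ n →
      ggpInner cc y Y (PySem.List.pyRange s cols 1) X =
        (if (PySem.List.pyGetD cc 1 0 ≥ Y ∧ PySem.List.pyGetD cc 1 0 < Y + 10) ∧
            s ≤ PySem.Int.floordiv (PySem.List.pyGetD cc 0 0) 10 + 1 ∧
            PySem.Int.floordiv (PySem.List.pyGetD cc 0 0) 10 + 1 < cols
         then some [y, PySem.Int.floordiv (PySem.List.pyGetD cc 0 0) 10 + 1]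
         else none) := by
  intro n
  induction n with
  | zero =>
      intro s X hX hs
      rw [PySem.List.pyRange_one_eq_nil (by omega), if_neg (by omega)]
      rfl
  | succ n ih =>
      intro s X hX hs
      by_cases hcs : cols ≤ s
      · rw [PySem.List.pyRange_one_eq_nil hcs, if_neg (by omega)]; rfl
      · have hq := ggp_fd_bracket (PySem.List.pyGetD cc 0 0)
        rw [PySem.List.pyRange_one_cons (by omega)]
        show (if _ then _ else ggpInner cc y Y (PySem.List.pyRange (s + 1) cols 1) (X + 10)) = _
        by_cases hcond : PySem.List.pyGetD cc 1 0 ≥ Y ∧ PySem.List.pyGetD cc 1 0 < Y + 10 ∧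
            PySem.List.pyGetD cc 0 0 ≥ X ∧ PySem.List.pyGetD cc 0 0 < X + 10
        · rw [if_pos hcond, if_pos (⟨⟨hcond.1, hcond.2.1⟩, by omega, by omega⟩ :
            (PySem.List.pyGetD cc 1 0 ≥ Y ∧ PySem.List.pyGetD cc 1 0 < Y + 10) ∧ _ ∧ _)]
          have : PySem.Int.floordiv (PySem.List.pyGetD cc 0 0) 10 + 1 = s := by omega
          rw [this]
        · rw [if_neg hcond, ih (s + 1) (X + 10) (by omega) (by omega)]
          by_cases h1 : (PySem.List.pyGetD cc 1 0 ≥ Y ∧ PySem.List.pyGetD cc 1 0 < Y + 10) ∧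
              s + 1 ≤ PySem.Int.floordiv (PySem.List.pyGetD cc 0 0) 10 + 1 ∧
              PySem.Int.floordiv (PySem.List.pyGetD cc 0 0) 10 + 1 < cols
          · rw [if_pos h1, if_pos ⟨h1.1, by omega, h1.2.2⟩]
          · rw [if_neg h1, if_neg (by omega)]

-- characterisation of the outer loop started at y = t with Y_COORD = (t-1)*10
theorem ggpOuter_char (cc : List Int) (cols rows : Int) :
    ∀ (n : Nat) (t Y : Int), Y = (t - 1) * 10 → (rows - t).toNat ≤ n →
      ggpOuter cols cc (PySem.List.pyRange t rows 1) Y =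
        (if (t ≤ PySem.Int.floordiv (PySem.List.pyGetD cc 1 0) 10 + 1 ∧
             PySem.Int.floordiv (PySem.List.pyGetD cc 1 0) 10 + 1 < rows) ∧
            (1 ≤ PySem.Int.floordiv (PySem.List.pyGetD cc 0 0) 10 + 1 ∧
             PySem.Int.floordiv (PySem.List.pyGetD cc 0 0) 10 + 1 < cols)
         then some [PySem.Int.floordiv (PySem.List.pyGetD cc 1 0) 10 + 1,
                    PySem.Int.floordiv (PySem.List.pyGetD cc 0 0) 10 + 1]
         else none) := by
  intro n
  induction n with
  | zero =>
      intro t Y hY ht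
      rw [PySem.List.pyRange_one_eq_nil (by omega), if_neg (by omega)]
      rfl
  | succ n ih =>
      intro t Y hY ht
      by_cases hrt : rows ≤ t
      · rw [PySem.List.pyRange_one_eq_nil hrt, if_neg (by omega)]; rfl
      · have hq1 := ggp_fd_bracket (PySem.List.pyGetD cc 1 0)
        rw [PySem.List.pyRange_one_cons (by omega)]
        show (match ggpInner cc t Y (PySem.List.pyRange 1 cols 1) 0 with
              | some r => some r
              | none => ggpOuter cols cc (PySem.List.pyRange (t + 1) rows 1) (Y + 10)) = _
        rw [ggpInner_char cc t Y cols (cols - 1).toNat 1 0 (by ring) (by omega)]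
        by_cases hin : (PySem.List.pyGetD cc 1 0 ≥ Y ∧ PySem.List.pyGetD cc 1 0 < Y + 10) ∧
            1 ≤ PySem.Int.floordiv (PySem.List.pyGetD cc 0 0) 10 + 1 ∧
            PySem.Int.floordiv (PySem.List.pyGetD cc 0 0) 10 + 1 < cols
        · rw [if_pos hin]
          have hteq : PySem.Int.floordiv (PySem.List.pyGetD cc 1 0) 10 + 1 = t := by omega
          rw [if_pos (⟨⟨by omega, by omega⟩, hin.2⟩ : (_ ∧ _) ∧ _)]
          show some [t, _] = _
          rw [hteq]
        · rw [if_neg hin]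
          show ggpOuter cols cc (PySem.List.pyRange (t + 1) rows 1) (Y + 10) = _
          rw [ih (t + 1) (Y + 10) (by omega) (by omega)]
          by_cases h1 : (t + 1 ≤ PySem.Int.floordiv (PySem.List.pyGetD cc 1 0) 10 + 1 ∧
              PySem.Int.floordiv (PySem.List.pyGetD cc 1 0) 10 + 1 < rows) ∧
              (1 ≤ PySem.Int.floordiv (PySem.List.pyGetD cc 0 0) 10 + 1 ∧
               PySem.Int.floordiv (PySem.List.pyGetD cc 0 0) 10 + 1 < cols)
          · rw [if_pos h1, if_pos ⟨⟨by omega, h1.1.2⟩, h1.2⟩]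
          · rw [if_neg h1, if_neg (by omega)]

-- ===== VERDICT (by name: the statement is the Claim_ definition above) =====
theorem get_grid_pos_spec : Claim_equal_get_grid_pos := by
  intro grid cc _ _
  unfold Spec_get_grid_pos get_grid_pos get_grid_pos_alt
  rw [ggpOuter_char cc ((grid.headD []).length : Int) (grid.length : Int)
        ((grid.length : Int) - 1).toNat 1 0 (by ring) (by omega)]
  by_cases h1 : (1 ≤ PySem.Int.floordiv (PySem.List.pyGetD cc 1 0) 10 + 1 ∧
      PySem.Int.floordiv (PySem.List.pyGetD cc 1 0) 10 + 1 < (grid.length : Int)) ∧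
      (1 ≤ PySem.Int.floordiv (PySem.List.pyGetD cc 0 0) 10 + 1 ∧
       PySem.Int.floordiv (PySem.List.pyGetD cc 0 0) 10 + 1 < ((grid.headD []).length : Int))
  · rw [if_pos h1, if_neg (by omega), if_pos ⟨h1.1.1, by omega, h1.2.1, by omega⟩]
  · rw [if_neg h1]
    by_cases hg : grid.length < 2 ∨ (grid.headD []).length < 2
    · rw [if_pos hg]
    · rw [if_neg hg, if_neg (by omega)]
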